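-- pv_equiv track=rewrite | github.com/Conway/VoteMaster | models.py | obfuscate_email
-- ===== SOURCE A (Python) =====
-- def obfuscate_email(email):
--     idx = email.index("@")
--     out = ''
--     for x in range(idx):
--         if x == 0 or x == idx - 1 or email[x] == '.':
--             out += email[x]
--         else:
--             out += '*'
--     for y in range(idx, len(email)):
--         out += email[y]
--     return out
-- ===== SOURCE B (Python) =====
-- def obfuscate_email(email):
--     idx = email.index("@")
--     local, domain = email[:idx], email[idx:]
--
--     def mask_mid(s):
--         # mask every char except the last one, keeping dots
--         if len(s) <= 1:
--             return s
--         head = s[0] if s[0] == '.' else '*'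
--         return head + mask_mid(s[1:])
--
--     if local:
--         local = local[0] + mask_mid(local[1:])
--     return local + domain
-- ===== Notes on version B (the rewrite author's own statement) =====
-- stated objective: simpler
-- what changed: Replaces the index-by-index loop with per-position boundary conditionals by slicing the string into local/domain parts and masking the local part's interior by structural recursion (first and last characters kept by construction, not by index tests).
import Mathlib
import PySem

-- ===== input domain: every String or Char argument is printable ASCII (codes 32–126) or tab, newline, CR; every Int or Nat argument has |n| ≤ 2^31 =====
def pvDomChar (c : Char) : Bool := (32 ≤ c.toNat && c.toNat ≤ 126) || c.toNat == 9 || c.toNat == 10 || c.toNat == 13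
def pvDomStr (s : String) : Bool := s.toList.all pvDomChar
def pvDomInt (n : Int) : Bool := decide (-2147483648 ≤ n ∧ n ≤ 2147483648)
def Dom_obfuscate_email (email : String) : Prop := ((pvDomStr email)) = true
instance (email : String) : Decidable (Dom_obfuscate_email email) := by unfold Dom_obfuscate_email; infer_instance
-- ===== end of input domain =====

-- B masks the local part by slicing it off and recursing over its interior instead of
-- A's index loop with boundary conditionals; objective: simpler.

-- ===== PORT A =====
def obfuscate_email (email : String) : String :=
  let cs := email.toList
  let idx := PySem.Chars.find cs "@".toList   -- email.index("@"); Pre_ excludes the ValueError case (find = -1)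
  let out : List Char :=
    (PySem.List.pyRange 0 idx).foldl (fun out x =>
      if x == 0 || x == idx - 1 || PySem.List.pyGetD cs x '*' == '.' then
        out ++ [PySem.List.pyGetD cs x '*']   -- x ∈ range(idx) is always in range, so the default is never read
      else
        out ++ ['*']) []
  let out := (PySem.List.pyRange idx (PySem.List.len cs)).foldl
      (fun out y => out ++ [PySem.List.pyGetD cs y '*']) out
  String.ofList out

-- ===== PORT B =====
-- mask_mid: mask every char except the last one, keeping dots
def maskMid : List Char → List Char
  | [] => []
  | [c] => [c]
  | c :: c' :: rest => (if c == '.' then c else '*') :: maskMid (c' :: rest)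

def obfuscate_email_alt (email : String) : String :=
  let cs := email.toList
  let idx := PySem.Chars.find cs "@".toList   -- email.index("@")
  let loc := PySem.List.slice cs none (some idx)
  let domain := PySem.List.slice cs (some idx) none
  let loc' := match loc with
    | [] => loc
    | h :: t => h :: maskMid t
  String.ofList (loc' ++ domain)

-- ===== PRECONDITION & SPEC =====
-- Pre_ excludes exactly the inputs without '@', on which Python's email.index("@") raises ValueError.
def Pre_obfuscate_email (email : String) : Prop := '@' ∈ email.toList
instance (email : String) : Decidable (Pre_obfuscate_email email) := by unfold Pre_obfuscate_email; infer_instance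
def pvWitness_obfuscate_email : String := "john.doe@x.com"

def Spec_obfuscate_email (email : String) (out : String) : Prop := out = obfuscate_email_alt email
instance (email : String) (out : String) : Decidable (Spec_obfuscate_email email out) := by unfold Spec_obfuscate_email; infer_instance

-- ===== CLAIM (what is proved, stated in full; the proofs are below) =====
def Claim_equal_obfuscate_email : Prop := ∀ (email : String), Dom_obfuscate_email email → Pre_obfuscate_email email → Spec_obfuscate_email email (obfuscate_email email)

-- ===== LEMMAS AND PROOFS =====

theorem maskMid_length (t : List Char) : (maskMid t).length = t.length := by
  induction t with
  | nil => rfl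
  | cons c rest ih =>
    cases rest with
    | nil => rfl
    | cons c' r => simp [maskMid] at ih ⊢; omega

theorem maskMid_getElem (t : List Char) (j : Nat) (h : j < t.length)
    (h' : j < (maskMid t).length) :
    (maskMid t)[j] = if j = t.length - 1 then t[j] else if t[j] = '.' then t[j] else '*' := by
  induction t generalizing j with
  | nil => simp at h
  | cons c rest ih =>
    cases rest with
    | nil =>
      have : j = 0 := by simpa using h
      subst this
      simp [maskMid]
    | cons c' r =>
      cases j with
      | zero =>
        have hne0 : ¬ (0 = (c :: c' :: r).length - 1) := by
          simp only [List.length_cons]; omega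
        simp only [maskMid, List.getElem_cons_zero, hne0, if_false, beq_iff_eq]
      | succ j =>
        have hj : j < (c' :: r).length := by simpa using h
        have hj' : j < (maskMid (c' :: r)).length := by rw [maskMid_length]; exact hj
        have hih := ih j hj hj'
        simp only [maskMid, List.getElem_cons_succ]
        rw [hih]
        have hiff : (j = (c' :: r).length - 1) ↔ (j + 1 = (c :: c' :: r).length - 1) := by
          simp only [List.length_cons]; omega
        by_cases hc : j = (c' :: r).length - 1
        · rw [if_pos hc, if_pos (hiff.mp hc)]
        · rw [if_neg hc, if_neg (fun h => hc (hiff.mpr h))]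

-- B's local-part masking, characterised element-by-element, equals A's per-index choice.
theorem mask_map_eq (l : List Char) :
    (List.range l.length).map
        (fun x => if x = 0 ∨ x = l.length - 1 ∨ l.getD x '*' = '.' then l.getD x '*' else '*')
      = (match l with | [] => l | h :: t => h :: maskMid t) := by
  cases l with
  | nil => rfl
  | cons h t =>
    apply List.ext_getElem
    · simp [maskMid_length]
    · intro i h1 h2
      simp only [List.getElem_map, List.getElem_range] at *
      have hi : i < (h :: t).length := by simpa using h1
      rw [List.getD_eq_getElem _ _ hi]
      cases i with
      | zero => simp
      | succ j =>
        have hjt : j < t.length := by simpa using hi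
        have hjt' : j < (maskMid t).length := by rw [maskMid_length]; exact hjt
        simp only [List.getElem_cons_succ]
        rw [maskMid_getElem t j hjt hjt']
        have : ¬ (j + 1 = 0) := by omega
        simp only [List.length_cons, this, false_or]
        have heq : (j + 1 = t.length + 1 - 1) ↔ (j = t.length - 1) := by omega
        by_cases hlast : j = t.length - 1
        · have hsa : t.length - 1 + 1 = t.length := by omega
          simp [hlast, hsa]
        · simp only [heq, hlast, false_or]
          split <;> simp_all

-- the second loop of A, over range(idx, len), reads off the drop
theorem map_pyGetD_range' (cs : List Char) (n m : Nat) (hn : n + m = cs.length) :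
    (PySem.List.pyRange (n : Int) (PySem.List.len cs)).map
        (fun y => PySem.List.pyGetD cs y '*')
      = cs.drop n := by
  induction m generalizing n with
  | zero =>
    have hnil : PySem.List.pyRange (↑n) (PySem.List.len cs) = [] := by
      apply PySem.List.pyRange_one_eq_nil
      simp [PySem.List.len]; omega
    rw [hnil, List.map_nil, List.drop_of_length_le (by omega : cs.length ≤ n)]
  | succ m ih =>
    have hlt : (n : Int) < PySem.List.len cs := by simp [PySem.List.len]; omega
    rw [PySem.List.pyRange_one_cons hlt]
    simp only [List.map_cons]
    have hc1 : ((n : Int) + 1) = ((n + 1 : Nat) : Int) := by push_cast; ring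
    rw [hc1, ih (n + 1) (by omega)]
    have hd : cs.drop n = cs[n] :: cs.drop (n + 1) := List.drop_eq_getElem_cons (by omega)
    rw [PySem.List.pyGetD_natCast, List.getD_eq_getElem _ _ (by omega), hd]

-- ===== VERDICT (by name: the statement is the Claim_ definition above) =====
theorem obfuscate_email_spec : Claim_equal_obfuscate_email := by
  intro email _ hpre
  unfold Spec_obfuscate_email obfuscate_email obfuscate_email_alt
  set cs := email.toList with hcs
  -- the common idx = email.index('@') is a genuine nonnegative index
  have hinf : "@".toList <:+: cs := by
    obtain ⟨pre, suf, h⟩ := List.mem_iff_append.mp hpre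
    refine ⟨pre, suf, ?_⟩
    show pre ++ "@".toList ++ suf = email.toList
    rw [h]; simp
  have hne : PySem.Chars.find cs "@".toList ≠ -1 := fun h =>
    ((PySem.Chars.find_eq_neg_one_iff cs "@".toList).mp h) hinf
  have hne' : PySem.Chars.findFrom cs "@".toList 0 ≠ -1 := by
    rw [PySem.Chars.findFrom_zero]
    exact hne
  have hspec := PySem.Chars.findFrom_natCast_spec cs "@".toList 0 (Nat.zero_le _) (by exact_mod_cast hne')
  simp only [Nat.cast_zero, PySem.Chars.findFrom_zero] at hspec
  obtain ⟨hge, hpfx, -⟩ := hspec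
  set n := (PySem.Chars.find cs "@".toList).toNat with hn
  have hfind : PySem.Chars.find cs "@".toList = (n : Int) := by
    rw [hn, Int.toNat_of_nonneg (by exact_mod_cast hge)]
  have hlt : n < cs.length := by
    have := hpfx.length_le
    simp at this
    omega
  simp only [hfind]
  -- A's first loop: fold of appends = map over range
  have hbody : (fun (out : List Char) (x : Int) =>
      if x == 0 || x == (n : Int) - 1 || PySem.List.pyGetD cs x '*' == '.' then
        out ++ [PySem.List.pyGetD cs x '*']
      else out ++ ['*'])
    = (fun out x => out ++ [if x == 0 || x == (n : Int) - 1 || PySem.List.pyGetD cs x '*' == '.'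
        then PySem.List.pyGetD cs x '*' else '*']) := by
    funext out x; split <;> rfl
  rw [hbody, PySem.List.foldl_append_singleton_eq_map, PySem.List.foldl_append_singleton_eq_map,
      List.nil_append,
      PySem.List.pyRange_zero_natCast, List.map_map,
      map_pyGetD_range' cs n (cs.length - n) (by omega),
      PySem.List.slice_to_natCast, PySem.List.slice_from_natCast]
  -- reduce A's map over casts to the Nat-indexed map of mask_map_eq, on l = cs.take n
  have hlen : (cs.take n).length = n := by simp; omega
  have hmap : (List.range n).map ((fun (x : Int) =>
        if x == 0 || x == (n : Int) - 1 || PySem.List.pyGetD cs x '*' == '.'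
        then PySem.List.pyGetD cs x '*' else '*') ∘ (fun k : Nat => (k : Int)))
      = (List.range (cs.take n).length).map
        (fun x => if x = 0 ∨ x = (cs.take n).length - 1 ∨ (cs.take n).getD x '*' = '.'
          then (cs.take n).getD x '*' else '*') := by
    rw [hlen]
    apply List.map_congr_left
    intro k hk
    have hk' : k < n := List.mem_range.mp hk
    have hgd : PySem.List.pyGetD cs (k : Int) '*' = (cs.take n).getD k '*' := by
      rw [PySem.List.pyGetD_natCast,
          List.getD_eq_getElem _ _ (by omega : k < cs.length),
          List.getD_eq_getElem _ _ (by omega : k < (cs.take n).length),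
          List.getElem_take]
    have e2 : ((k : Int) == (n : Int) - 1) = decide (k = n - 1) := by
      rw [Bool.beq_eq_decide_eq]
      simp only [decide_eq_decide]; omega
    have e1 : ((k : Int) == 0) = decide (k = 0) := by
      rw [Bool.beq_eq_decide_eq]
      simp only [decide_eq_decide]; omega
    have e3 : ((cs.take n).getD k '*' == '.') = decide ((cs.take n).getD k '*' = '.') :=
      Bool.beq_eq_decide_eq _ _
    simp only [Function.comp, hgd, e1, e2, e3, ← Bool.decide_or, decide_eq_true_eq, or_assoc]
  rw [hmap, mask_map_eq (cs.take n)]
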